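-- pv_equiv track=rewrite | github.com/hzfsls/grammar-study | lang_sols/euler.py | pentagon_numbers
-- ===== SOURCE A (Python) =====
-- def pentagon_numbers(n: int) -> int:
--     pentagon = set()
--     for i in range(1, n):
--         pentagon.add(i * (3 * i - 1) // 2)
--     result = -1
--     for j in pentagon:
--         for k in pentagon:
--             if j + k in pentagon and k - j in pentagon:
--                 if result == -1 or k - j < result:
--                     result = k - j
--     return result
-- ===== SOURCE B (Python) =====
-- def pentagon_numbers(n: int) -> int:
--     # iterate candidate differences in ascending order; return the first workable one
--     pents = [i * (3 * i - 1) // 2 for i in range(1, n)]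
--     pset = set(pents)
--     for d in pents:
--         for j in pents:
--             if j + d in pset and 2 * j + d in pset:
--                 return d
--     return -1
-- ===== Notes on version B (the rewrite author's own statement) =====
-- stated objective: faster
-- what changed: B generates the pentagonal numbers once as an ascending list, scans candidate differences in ascending order and returns the first difference d for which some j has j+d and 2j+d pentagonal (early exit), instead of A's full minimum over all ordered pairs of the set.
import Mathlib
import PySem

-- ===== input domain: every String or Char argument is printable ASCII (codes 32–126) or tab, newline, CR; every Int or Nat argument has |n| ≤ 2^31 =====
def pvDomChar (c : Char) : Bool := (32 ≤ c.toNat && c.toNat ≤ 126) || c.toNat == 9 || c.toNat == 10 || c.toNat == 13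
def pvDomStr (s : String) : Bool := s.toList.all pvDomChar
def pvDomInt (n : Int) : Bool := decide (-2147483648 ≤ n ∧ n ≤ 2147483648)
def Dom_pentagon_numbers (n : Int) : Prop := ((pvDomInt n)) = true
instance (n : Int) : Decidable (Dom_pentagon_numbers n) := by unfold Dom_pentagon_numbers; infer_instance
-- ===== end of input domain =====

-- B iterates candidate differences in ascending order and returns the first workable one
-- (early exit) instead of A's minimum over all pairs; return values are proved equal.

-- ===== PORT A =====
def pentagon_numbers (n : Int) : Int :=
  let pentagon : PySem.Set Int :=
    (PySem.List.pyRange 1 n 1).foldl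
      (fun s i => PySem.Set.add s (PySem.Int.floordiv (i * (3 * i - 1)) 2)) PySem.Set.empty
  pentagon.foldl (fun result j =>
    pentagon.foldl (fun result k =>
      if PySem.Set.contains pentagon (j + k) && PySem.Set.contains pentagon (k - j) then
        (if result == -1 || k - j < result then k - j else result)
      else result) result) (-1)

-- ===== PORT B =====
def pentagon_numbers_alt (n : Int) : Int :=
  let pents : List Int :=
    (PySem.List.pyRange 1 n 1).map (fun i => PySem.Int.floordiv (i * (3 * i - 1)) 2)
  let pset : PySem.Set Int := PySem.Set.ofList pents
  match pents.find? (fun d =>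
      pents.any (fun j =>
        PySem.Set.contains pset (j + d) && PySem.Set.contains pset (2 * j + d))) with
  | some d => d
  | none => -1

-- ===== PRECONDITION & SPEC =====
def Spec_pentagon_numbers (n : Int) (out : Int) : Prop := out = pentagon_numbers_alt n
instance (n : Int) (out : Int) : Decidable (Spec_pentagon_numbers n out) := by
  unfold Spec_pentagon_numbers; infer_instance

-- ===== CLAIM (what is proved, stated in full; the proofs are below) =====
def Claim_equal_pentagon_numbers : Prop :=
  ∀ (n : Int), Dom_pentagon_numbers n → Spec_pentagon_numbers n (pentagon_numbers n)

-- ===== LEMMAS AND PROOFS =====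

/-- the pentagonal-number formula used by both programs -/
def pvP (i : Int) : Int := PySem.Int.floordiv (i * (3 * i - 1)) 2

/-- the list of pentagonal numbers P(1) … P(n-1), in ascending order -/
def pvPents (n : Int) : List Int := (PySem.List.pyRange 1 n 1).map pvP

lemma pvP_lt {a b : Int} (ha : 1 ≤ a) (hab : a < b) : pvP a < pvP b := by
  unfold pvP
  rw [PySem.Int.floordiv_eq_ediv_of_pos (by norm_num),
      PySem.Int.floordiv_eq_ediv_of_pos (by norm_num)]
  have h : a * (3 * a - 1) + 2 ≤ b * (3 * b - 1) := by nlinarith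
  omega

lemma pvP_pos {i : Int} (hi : 1 ≤ i) : 1 ≤ pvP i := by
  unfold pvP
  rw [PySem.Int.floordiv_eq_ediv_of_pos (by norm_num)]
  have h : 2 ≤ i * (3 * i - 1) := by nlinarith
  omega

lemma pvPents_pairwise (n : Int) : (pvPents n).Pairwise (· < ·) := by
  unfold pvPents
  rw [List.pairwise_map]
  have h := PySem.List.pairwise_lt_pyRange_one 1 n
  refine List.Pairwise.imp_of_mem ?_ h
  intro a b hma _ hab
  exact pvP_lt (by
    have := (PySem.List.mem_pyRange_one).mp hma
    omega) hab

lemma pvPents_nodup (n : Int) : (pvPents n).Nodup := (pvPents_pairwise n).nodup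

lemma pvPents_pos (n : Int) : ∀ x ∈ pvPents n, 1 ≤ x := by
  intro x hx
  unfold pvPents at hx
  rcases List.mem_map.mp hx with ⟨i, hi, rfl⟩
  exact pvP_pos (by have := (PySem.List.mem_pyRange_one).mp hi; omega)

/-- A's set-building loop produces exactly the list pvPents n. -/
lemma pentagon_set_eq (n : Int) :
    (PySem.List.pyRange 1 n 1).foldl
      (fun s i => PySem.Set.add s (PySem.Int.floordiv (i * (3 * i - 1)) 2))
      PySem.Set.empty = pvPents n := by
  have h := PySem.Set.update_map_eq_foldl_add (s := PySem.Set.empty)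
      (l := PySem.List.pyRange 1 n 1) (f := fun i => PySem.Int.floordiv (i * (3 * i - 1)) 2)
  rw [← h, show (PySem.Set.empty : PySem.Set Int) = ([] : List Int) from rfl,
      PySem.Set.update_nil_left]
  exact PySem.Set.ofList_eq_self_of_nodup _ (pvPents_nodup n)

/-- a double foldl over two lists is a foldl over the pair list -/
lemma pvFoldl_foldl {α : Type} (l1 l2 : List α) (g : Int → α → α → Int) (r : Int) :
    l1.foldl (fun r j => l2.foldl (fun r k => g r j k) r) r
      = (l1.flatMap (fun j => l2.map (fun k => (j, k)))).foldl (fun r p => g r p.1 p.2) r := by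
  induction l1 generalizing r with
  | nil => rfl
  | cons a t ih => simp [List.flatMap_cons, List.foldl_append, List.foldl_map, ih]

/-- A's guarded pair fold is a fold over the filterMap of the guard -/
lemma pvFoldl_guard (n : Int) (L : List (Int × Int)) (r : Int) :
    L.foldl (fun r p =>
        if PySem.Set.contains (pvPents n) (p.1 + p.2)
            && PySem.Set.contains (pvPents n) (p.2 - p.1) then
          (if r == -1 || p.2 - p.1 < r then p.2 - p.1 else r)
        else r) r
      = (L.filterMap (fun p =>
          if PySem.Set.contains (pvPents n) (p.1 + p.2)
              && PySem.Set.contains (pvPents n) (p.2 - p.1)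
          then some (p.2 - p.1) else none)).foldl
          (fun r x => if r == -1 || x < r then x else r) r := by
  induction L generalizing r with
  | nil => rfl
  | cons a t ih =>
    by_cases h : (PySem.Set.contains (pvPents n) (a.1 + a.2)
        && PySem.Set.contains (pvPents n) (a.2 - a.1)) = true
    · simp only [List.foldl_cons, List.filterMap_cons, h, if_true]
      exact ih _
    · simp only [List.foldl_cons, List.filterMap_cons, eq_false_of_ne_true h]
      exact ih _

/-- A's accumulator update is `min` with sentinel -1 -/
lemma pvMinupd (r x : Int) :
    (if r == -1 || x < r then x else r) = if r = -1 then x else min x r := by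
  by_cases h : r = -1
  · simp [h]
  · simp [h, min_def]
    split_ifs with h1 h2 h2 <;> omega

lemma pvMinfold_pos (xs : List Int) (hpos : ∀ x ∈ xs, 1 ≤ x) (r : Int) (hr : 1 ≤ r) :
    xs.foldl (fun r x => if r = -1 then x else min x r) r
      = xs.foldl (fun a x => min x a) r := by
  induction xs generalizing r with
  | nil => rfl
  | cons a t ih =>
    simp only [List.foldl_cons, if_neg (by omega : ¬ r = -1)]
    exact ih (fun x hx => hpos x (List.mem_cons_of_mem a hx)) (min a r)
      (le_min (hpos a List.mem_cons_self) hr)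

/-- the full min-fold with sentinel equals `min?.getD (-1)` (all values ≥ 1) -/
lemma pvMinfold (xs : List Int) (hpos : ∀ x ∈ xs, 1 ≤ x) :
    xs.foldl (fun r x => if r = -1 then x else min x r) (-1)
      = (xs.min?).getD (-1) := by
  cases xs with
  | nil => rfl
  | cons a t =>
    have ha : 1 ≤ a := hpos a (by simp)
    have h1 : List.foldl (fun r x => if r = -1 then x else min x r) (-1) (a :: t)
        = List.foldl (fun r x => if r = -1 then x else min x r) a t := by simp
    rw [h1, pvMinfold_pos t (fun x hx => hpos x (List.mem_cons_of_mem a hx)) a ha, List.min?_cons']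
    have h2 : ∀ (r : Int), t.foldl (fun a x => min x a) r = t.foldl min r := by
      intro r
      simp [min_comm]
    simp [h2]

/-- first match of a predicate in a strictly ascending list is minimal among matches -/
lemma pvFind_min {p : Int → Bool} {l : List Int} {d : Int}
    (hs : l.Pairwise (· < ·)) (hf : l.find? p = some d) :
    ∀ x ∈ l, p x = true → d ≤ x := by
  induction l with
  | nil => simp at hf
  | cons a t ih =>
    rcases List.pairwise_cons.mp hs with ⟨ha, ht⟩
    by_cases hpa : p a = true
    · simp only [List.find?_cons, hpa] at hf
      obtain rfl : a = d := by injection hf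
      intro x hx _
      rcases List.mem_cons.mp hx with rfl | hx
      · exact le_refl x
      · exact le_of_lt (ha x hx)
    · simp only [List.find?_cons, hpa] at hf
      intro x hx hpx
      rcases List.mem_cons.mp hx with rfl | hx
      · exact absurd hpx hpa
      · exact ih ht hf x hx hpx

/-- B's inner predicate -/
def pvPred (n : Int) (d : Int) : Bool :=
  (pvPents n).any (fun j =>
    PySem.Set.contains (pvPents n) (j + d) && PySem.Set.contains (pvPents n) (2 * j + d))

/-- A's candidate-difference list -/
def pvDiffs (n : Int) : List Int :=
  ((pvPents n).flatMap (fun j => (pvPents n).map (fun k => (j, k)))).filterMap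
    (fun p => if PySem.Set.contains (pvPents n) (p.1 + p.2)
                 && PySem.Set.contains (pvPents n) (p.2 - p.1)
              then some (p.2 - p.1) else none)

lemma pvAnd_iff {a b : Bool} : (a && b) = true ↔ a = true ∧ b = true := by simp

lemma pvMem_diffs {n x : Int} :
    x ∈ pvDiffs n ↔ x ∈ pvPents n ∧ pvPred n x = true := by
  constructor
  · intro hx
    rcases List.mem_filterMap.mp hx with ⟨p, hp, hsome⟩
    rcases List.mem_flatMap.mp hp with ⟨j, hj, hk⟩
    rcases List.mem_map.mp hk with ⟨k, hkmem, rfl⟩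
    simp only at hsome
    split_ifs at hsome with hc
    · obtain rfl : k - j = x := by injection hsome
      rcases pvAnd_iff.mp hc with ⟨hsum, hdiff⟩
      have hdiff' := (PySem.Set.contains_iff _ _).mp hdiff
      have hsum' := (PySem.Set.contains_iff _ _).mp hsum
      refine ⟨hdiff', ?_⟩
      unfold pvPred
      rw [List.any_eq_true]
      refine ⟨j, hj, ?_⟩
      have h1 : j + (k - j) = k := by ring
      have h2 : 2 * j + (k - j) = j + k := by ring
      rw [h1, h2]
      exact pvAnd_iff.mpr ⟨(PySem.Set.contains_iff _ _).mpr hkmem,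
        (PySem.Set.contains_iff _ _).mpr hsum'⟩
  · rintro ⟨hxp, hpx⟩
    unfold pvPred at hpx
    rcases List.any_eq_true.mp hpx with ⟨j, hj, hcond⟩
    rcases pvAnd_iff.mp hcond with ⟨hjd, h2jd⟩
    have hjd' := (PySem.Set.contains_iff _ _).mp hjd
    have h2jd' := (PySem.Set.contains_iff _ _).mp h2jd
    apply List.mem_filterMap.mpr
    refine ⟨(j, j + x), ?_, ?_⟩
    · exact List.mem_flatMap.mpr ⟨j, hj, List.mem_map.mpr ⟨j + x, hjd', rfl⟩⟩
    · have hc : (PySem.Set.contains (pvPents n) (j + (j + x))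
          && PySem.Set.contains (pvPents n) (j + x - j)) = true := by
        have h1 : j + (j + x) = 2 * j + x := by ring
        have h2 : j + x - j = x := by ring
        rw [h1, h2]
        exact pvAnd_iff.mpr ⟨(PySem.Set.contains_iff _ _).mpr h2jd',
          (PySem.Set.contains_iff _ _).mpr hxp⟩
      simp only [hc, if_true]
      have h2 : j + x - j = x := by ring
      rw [h2]

/-- A's double loop computes min?.getD (-1) of the candidate-difference list -/
lemma pentagon_numbers_eq_min (n : Int) :
    pentagon_numbers n = ((pvDiffs n).min?).getD (-1) := by
  unfold pentagon_numbers
  simp only [pentagon_set_eq]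
  rw [pvFoldl_foldl (pvPents n) (pvPents n)
    (fun r j k => if PySem.Set.contains (pvPents n) (j + k)
        && PySem.Set.contains (pvPents n) (k - j) then
        (if r == -1 || k - j < r then k - j else r) else r) (-1)]
  rw [pvFoldl_guard n]
  have hupd : (fun (r x : Int) => if r == -1 || x < r then x else r)
      = fun r x => if r = -1 then x else min x r := by
    funext r x; exact pvMinupd r x
  rw [hupd]
  apply pvMinfold
  intro x hx
  exact pvPents_pos n x ((pvMem_diffs.mp hx).1)

lemma pentagon_alt_eq (n : Int) :
    pentagon_numbers_alt n
      = match (pvPents n).find? (pvPred n) with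
        | some d => d
        | none => -1 := by
  have hset : PySem.Set.ofList
        ((PySem.List.pyRange 1 n 1).map (fun i => PySem.Int.floordiv (i * (3 * i - 1)) 2))
      = (PySem.List.pyRange 1 n 1).map (fun i => PySem.Int.floordiv (i * (3 * i - 1)) 2) :=
    PySem.Set.ofList_eq_self_of_nodup _ (by
      have h := pvPents_nodup n; unfold pvPents pvP at h; exact h)
  unfold pentagon_numbers_alt
  simp only [hset]
  rfl

-- ===== VERDICT (by name: the statement is the Claim_ definition above) =====
theorem pentagon_numbers_spec : Claim_equal_pentagon_numbers := by
  intro n _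
  unfold Spec_pentagon_numbers
  rw [pentagon_numbers_eq_min, pentagon_alt_eq]
  cases hf : (pvPents n).find? (pvPred n) with
  | none =>
    have hempty : pvDiffs n = [] := by
      rw [List.eq_nil_iff_forall_not_mem]
      intro x hx
      rcases pvMem_diffs.mp hx with ⟨hxp, hpx⟩
      exact absurd hpx (by
        have := List.find?_eq_none.mp hf x hxp
        simp [this])
    simp [hempty]
  | some d =>
    have hd_mem : d ∈ pvPents n := List.mem_of_find?_eq_some hf
    have hd_pred : pvPred n d = true := List.find?_some hf
    have hd_in : d ∈ pvDiffs n := pvMem_diffs.mpr ⟨hd_mem, hd_pred⟩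
    cases hm : (pvDiffs n).min? with
    | none =>
      exfalso
      rw [List.min?_eq_none_iff.mp hm] at hd_in
      simp at hd_in
    | some m =>
      rcases List.min?_eq_some_iff.mp hm with ⟨hm_mem, hm_min⟩
      have h1 : m ≤ d := hm_min d hd_in
      have h2 : d ≤ m := by
        rcases pvMem_diffs.mp hm_mem with ⟨hmp, hmpred⟩
        exact pvFind_min (pvPents_pairwise n) hf m hmp hmpred
      simp [le_antisymm h2 h1]
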